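-- pv_equiv track=rewrite | github.com/joaoppg1/GrecoeCaio | funcoes.py | calcula_pontos_regra_simples
-- ===== SOURCE A (Python) =====
-- def calcula_pontos_regra_simples(faces):
--     dicionario = {1:0, 2:0, 3:0, 4:0, 5:0, 6:0}
--     for numero in faces:
--         if numero == 1:
--             dicionario[1] += 1
--         elif numero == 2:
--             dicionario[2] += 2
--         elif numero == 3:
--             dicionario[3] += 3
--         elif numero == 4:
--             dicionario[4] += 4
--         elif numero == 5:
--             dicionario[5] += 5
--         elif numero == 6:
--             dicionario[6] += 6
--     return dicionario
-- ===== SOURCE B (Python) =====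
-- def calcula_pontos_regra_simples(faces):
--     return {n: faces.count(n) * n for n in range(1, 7)}
-- ===== Notes on version B (the rewrite author's own statement) =====
-- stated objective: idiomatic
-- what changed: Replaces the per-element six-way if/elif dispatch mutating a dict with a tally-then-weight comprehension over the fixed key range 1..6, counting each face with list.count.
import Mathlib
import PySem

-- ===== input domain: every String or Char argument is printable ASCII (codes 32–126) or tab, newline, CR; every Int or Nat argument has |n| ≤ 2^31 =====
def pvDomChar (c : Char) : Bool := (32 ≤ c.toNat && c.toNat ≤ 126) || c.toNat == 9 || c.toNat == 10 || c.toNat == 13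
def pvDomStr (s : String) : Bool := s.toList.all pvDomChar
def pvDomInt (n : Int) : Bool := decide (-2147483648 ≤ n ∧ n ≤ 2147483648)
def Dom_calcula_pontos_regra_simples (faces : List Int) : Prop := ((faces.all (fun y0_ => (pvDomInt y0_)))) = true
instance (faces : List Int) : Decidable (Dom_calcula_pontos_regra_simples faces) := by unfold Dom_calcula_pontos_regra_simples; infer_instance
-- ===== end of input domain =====

-- B replaces A's per-element if/elif dispatch into a mutated dict by a count-then-weight
-- comprehension over the fixed key range 1..6 (objective: idiomatic).

-- ===== PORT A =====
def pvStepA (d : PySem.Dict Int Int) (numero : Int) : PySem.Dict Int Int :=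
  if numero == 1 then d.insert 1 (d.getD 1 0 + 1)
  else if numero == 2 then d.insert 2 (d.getD 2 0 + 2)
  else if numero == 3 then d.insert 3 (d.getD 3 0 + 3)
  else if numero == 4 then d.insert 4 (d.getD 4 0 + 4)
  else if numero == 5 then d.insert 5 (d.getD 5 0 + 5)
  else if numero == 6 then d.insert 6 (d.getD 6 0 + 6)
  else d

def calcula_pontos_regra_simples (faces : List Int) : List (Int × Int) :=
  let dicionario : PySem.Dict Int Int :=
    PySem.Dict.ofList [(1, 0), (2, 0), (3, 0), (4, 0), (5, 0), (6, 0)]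
  (faces.foldl pvStepA dicionario).items

-- ===== PORT B =====
def calcula_pontos_regra_simples_alt (faces : List Int) : List (Int × Int) :=
  (PySem.List.pyRange 1 7 1).map (fun n => (n, PySem.List.count faces n * n))

-- ===== PRECONDITION & SPEC =====
def Spec_calcula_pontos_regra_simples (faces : List Int) (out : List (Int × Int)) : Prop := out = calcula_pontos_regra_simples_alt faces
instance (faces : List Int) (out : List (Int × Int)) : Decidable (Spec_calcula_pontos_regra_simples faces out) := by unfold Spec_calcula_pontos_regra_simples; infer_instance

-- ===== CLAIM (what is proved, stated in full; the proofs are below) =====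
def Claim_equal_calcula_pontos_regra_simples : Prop := ∀ (faces : List Int), Dom_calcula_pontos_regra_simples faces → Spec_calcula_pontos_regra_simples faces (calcula_pontos_regra_simples faces)

-- ===== LEMMAS AND PROOFS =====

-- A's loop from any dict with exactly the keys 1..6: each branch bumps its own slot,
-- so the final slot for n holds its start value plus n times the number of n's.
lemma loopA (faces : List Int) (a1 a2 a3 a4 a5 a6 : Int) :
    faces.foldl pvStepA (PySem.Dict.mk [(1, a1), (2, a2), (3, a3), (4, a4), (5, a5), (6, a6)]) =
    PySem.Dict.mk [(1, a1 + (faces.count 1 : Int) * 1), (2, a2 + (faces.count 2 : Int) * 2),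
                   (3, a3 + (faces.count 3 : Int) * 3), (4, a4 + (faces.count 4 : Int) * 4),
                   (5, a5 + (faces.count 5 : Int) * 5), (6, a6 + (faces.count 6 : Int) * 6)] := by
  induction faces generalizing a1 a2 a3 a4 a5 a6 with
  | nil => simp
  | cons x xs ih =>
    simp only [List.foldl_cons]
    by_cases h1 : x = 1
    · subst h1
      rw [show pvStepA (PySem.Dict.mk [(1, a1), (2, a2), (3, a3), (4, a4), (5, a5), (6, a6)]) 1 =
          PySem.Dict.mk [(1, a1 + 1), (2, a2), (3, a3), (4, a4), (5, a5), (6, a6)] by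
        simp [pvStepA, PySem.Dict.insert, PySem.Dict.getD, PySem.Dict.get?, PySem.Dict.contains]]
      rw [ih]
      simp
      ring
    · by_cases h2 : x = 2
      · subst h2
        rw [show pvStepA (PySem.Dict.mk [(1, a1), (2, a2), (3, a3), (4, a4), (5, a5), (6, a6)]) 2 =
            PySem.Dict.mk [(1, a1), (2, a2 + 2), (3, a3), (4, a4), (5, a5), (6, a6)] by
          simp [pvStepA, PySem.Dict.insert, PySem.Dict.getD, PySem.Dict.get?, PySem.Dict.contains]]
        rw [ih]
        simp
        ring
      · by_cases h3 : x = 3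
        · subst h3
          rw [show pvStepA (PySem.Dict.mk [(1, a1), (2, a2), (3, a3), (4, a4), (5, a5), (6, a6)]) 3 =
              PySem.Dict.mk [(1, a1), (2, a2), (3, a3 + 3), (4, a4), (5, a5), (6, a6)] by
            simp [pvStepA, PySem.Dict.insert, PySem.Dict.getD, PySem.Dict.get?, PySem.Dict.contains]]
          rw [ih]
          simp
          ring
        · by_cases h4 : x = 4
          · subst h4
            rw [show pvStepA (PySem.Dict.mk [(1, a1), (2, a2), (3, a3), (4, a4), (5, a5), (6, a6)]) 4 =
                PySem.Dict.mk [(1, a1), (2, a2), (3, a3), (4, a4 + 4), (5, a5), (6, a6)] by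
              simp [pvStepA, PySem.Dict.insert, PySem.Dict.getD, PySem.Dict.get?, PySem.Dict.contains]]
            rw [ih]
            simp
            ring
          · by_cases h5 : x = 5
            · subst h5
              rw [show pvStepA (PySem.Dict.mk [(1, a1), (2, a2), (3, a3), (4, a4), (5, a5), (6, a6)]) 5 =
                  PySem.Dict.mk [(1, a1), (2, a2), (3, a3), (4, a4), (5, a5 + 5), (6, a6)] by
                simp [pvStepA, PySem.Dict.insert, PySem.Dict.getD, PySem.Dict.get?, PySem.Dict.contains]]
              rw [ih]
              simp
              ring
            · by_cases h6 : x = 6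
              · subst h6
                rw [show pvStepA (PySem.Dict.mk [(1, a1), (2, a2), (3, a3), (4, a4), (5, a5), (6, a6)]) 6 =
                    PySem.Dict.mk [(1, a1), (2, a2), (3, a3), (4, a4), (5, a5), (6, a6 + 6)] by
                  simp [pvStepA, PySem.Dict.insert, PySem.Dict.getD, PySem.Dict.get?, PySem.Dict.contains]]
                rw [ih]
                simp
                ring
              · rw [show pvStepA (PySem.Dict.mk [(1, a1), (2, a2), (3, a3), (4, a4), (5, a5), (6, a6)]) x =
                    PySem.Dict.mk [(1, a1), (2, a2), (3, a3), (4, a4), (5, a5), (6, a6)] by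
                  simp [pvStepA, h1, h2, h3, h4, h5, h6]]
                rw [ih]
                simp [h1, h2, h3, h4, h5, h6]

-- ===== VERDICT (by name: the statement is the Claim_ definition above) =====
theorem calcula_pontos_regra_simples_spec : Claim_equal_calcula_pontos_regra_simples := by
  intro faces _
  unfold Spec_calcula_pontos_regra_simples calcula_pontos_regra_simples calcula_pontos_regra_simples_alt
  show (faces.foldl pvStepA (PySem.Dict.ofList [(1, 0), (2, 0), (3, 0), (4, 0), (5, 0), (6, 0)])).items = _
  rw [show (PySem.Dict.ofList [((1:Int), (0:Int)), (2, 0), (3, 0), (4, 0), (5, 0), (6, 0)]) =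
      PySem.Dict.mk [(1, 0), (2, 0), (3, 0), (4, 0), (5, 0), (6, 0)] from by decide]
  rw [loopA]
  rw [show PySem.List.pyRange 1 7 1 = [(1:Int), 2, 3, 4, 5, 6] from by decide]
  simp [PySem.List.count_eq]
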